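-- pv_equiv track=rewrite | github.com/animeshpanara/Comida_Work | functions.py | finalcatogery
-- ===== SOURCE A (Python) =====
-- def finalcatogery(featurevector):
--         z=[]
--         y=featurevector
--         for i in range(0,len(featurevector)):
--                 z.append([])
--         for i in range(0,len(featurevector)) :
--                 j=0
--                 while j<len(y[i]):
--                     if y[i][j]==1:
--                         if j>=0 and j<=3:
--                             z[i].append('non-veg')
--                             j=4
--                             continue
--                         if j>=4 and j<=7:
--                             z[i].append('veggies')
--                             j=8
--                             continue
--                         if j>=8 and j<=10:
--                             z[i].append('milk product')
--                             j=11
--                             continue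
--                     j=j+1
--                 if len(z[i])==0:
--                     z[i].append('extras')
--         return z;
-- ===== SOURCE B (Python) =====
-- def finalcatogery(featurevector):
--     table = ['non-veg'] * 4 + ['veggies'] * 4 + ['milk product'] * 3
--     result = []
--     for row in featurevector:
--         labels = []
--         for value, label in zip(row, table):
--             if value == 1 and label not in labels:
--                 labels.append(label)
--         result.append(labels if labels else ['extras'])
--     return result
-- ===== Notes on version B (the rewrite author's own statement) =====
-- stated objective: alternative
-- what changed: Replaced the index-walking while-loop with segment-skip jumps by a single pass that zips each row against an 11-entry index-to-label table and appends each label at its first hit (order-preserving dedup).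
import Mathlib
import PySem

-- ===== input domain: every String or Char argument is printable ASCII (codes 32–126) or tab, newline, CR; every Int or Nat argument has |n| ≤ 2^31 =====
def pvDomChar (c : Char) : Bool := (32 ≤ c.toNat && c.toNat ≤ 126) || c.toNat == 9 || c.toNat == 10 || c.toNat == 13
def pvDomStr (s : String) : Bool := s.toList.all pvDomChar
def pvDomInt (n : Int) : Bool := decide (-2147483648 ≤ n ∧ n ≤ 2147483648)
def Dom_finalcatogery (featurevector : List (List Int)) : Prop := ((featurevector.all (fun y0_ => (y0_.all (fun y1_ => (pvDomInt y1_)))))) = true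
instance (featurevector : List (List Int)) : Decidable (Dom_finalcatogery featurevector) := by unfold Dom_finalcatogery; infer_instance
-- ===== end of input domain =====

-- B replaces A's index-walking while-loop (with segment-skip jumps) by one pass
-- zipping the row against an 11-entry index-to-label table with order-preserving
-- dedup; objective: alternative.

-- ===== PORT A =====
-- the inner `while j < len(y[i])` loop of A, with its jump assignments j=4/8/11
def pvRowLoopA (row : List Int) (j : Nat) (acc : List String) : List String :=
  if _h : j < row.length then
    if row.getD j 0 = 1 then
      if j ≤ 3 then pvRowLoopA row 4 (acc ++ ["non-veg"])
      else if j ≤ 7 then pvRowLoopA row 8 (acc ++ ["veggies"])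
      else if j ≤ 10 then pvRowLoopA row 11 (acc ++ ["milk product"])
      else pvRowLoopA row (j + 1) acc
    else pvRowLoopA row (j + 1) acc
  else acc
termination_by row.length - j
decreasing_by all_goals omega

-- A: z starts as one empty list per row; the i-th iteration of the second loop
-- fills z[i] from y[i] with the while loop, then the len(z[i])==0 / 'extras' check.
def finalcatogery (featurevector : List (List Int)) : List (List String) :=
  featurevector.map (fun row =>
    let zi := pvRowLoopA row 0 []
    if zi.length = 0 then ["extras"] else zi)

-- ===== PORT B =====
-- Source B's table = ['non-veg']*4 + ['veggies']*4 + ['milk product']*3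
def pvTable : List String :=
  List.replicate 4 "non-veg" ++ List.replicate 4 "veggies" ++ List.replicate 3 "milk product"

-- Source B's inner loop body: append label at its first hit (value == 1, not yet present)
def pvRowStep (labels : List String) (p : Int × String) : List String :=
  if p.1 = 1 ∧ p.2 ∉ labels then labels ++ [p.2] else labels

def pvRowLabelsB (row : List Int) : List String :=
  let labels := (row.zip pvTable).foldl pvRowStep []
  if labels.isEmpty then ["extras"] else labels

def finalcatogery_alt (featurevector : List (List Int)) : List (List String) :=
  featurevector.map pvRowLabelsB

-- ===== PRECONDITION & SPEC =====
def Spec_finalcatogery (featurevector : List (List Int)) (out : List (List String)) : Prop := out = finalcatogery_alt featurevector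
instance (featurevector : List (List Int)) (out : List (List String)) : Decidable (Spec_finalcatogery featurevector out) := by unfold Spec_finalcatogery; infer_instance

-- ===== CLAIM (what is proved, stated in full; the proofs are below) =====
def Claim_equal_finalcatogery : Prop := ∀ (featurevector : List (List Int)), Dom_finalcatogery featurevector → Spec_finalcatogery featurevector (finalcatogery featurevector)

-- ===== LEMMAS AND PROOFS =====

-- peel one position off a segment slice
theorem pvSegStep (row : List Int) (j k : Nat) (hj : j < row.length) (hk : j < k) :
    (row.drop j).take (k - j) = row.getD j 0 :: ((row.drop (j + 1)).take (k - (j + 1))) := by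
  rw [List.drop_eq_getElem_cons hj, List.getD_eq_getElem row 0 hj]
  have h : k - j = (k - (j + 1)) + 1 := by omega
  rw [h, List.take_succ_cons]

-- segment 3 (indices 8..10), including the trailing do-nothing scan past 10
theorem pvSeg3 (row : List Int) : ∀ (fuel j : Nat) (acc : List String), 8 ≤ j → row.length ≤ j + fuel →
    pvRowLoopA row j acc = acc ++ (if 1 ∈ (row.drop j).take (11 - j) then ["milk product"] else []) := by
  intro fuel
  induction fuel with
  | zero =>
    intro j acc h8 hlen
    rw [pvRowLoopA, dif_neg (by omega : ¬ j < row.length)]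
    have hd : row.drop j = [] := List.drop_eq_nil_of_le (by omega)
    simp [hd]
  | succ n ih =>
    intro j acc h8 hlen
    rw [pvRowLoopA]
    by_cases hlt : j < row.length
    · rw [dif_pos hlt]
      by_cases h1 : row.getD j 0 = 1
      · have h1' := h1; rw [List.getD_eq_getElem?_getD] at h1'
        rw [if_pos h1, if_neg (by omega : ¬ j ≤ 3), if_neg (by omega : ¬ j ≤ 7)]
        by_cases h10 : j ≤ 10
        · rw [if_pos h10, ih 11 (acc ++ ["milk product"]) (by omega) (by omega)]
          rw [pvSegStep row j 11 hlt (by omega)]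
          simp [h1']
        · rw [if_neg h10, ih (j + 1) acc (by omega) (by omega)]
          have hd1 : 11 - j = 0 := by omega
          have hd2 : 11 - (j + 1) = 0 := by omega
          simp [hd1, hd2]
      · have h1' := h1; rw [List.getD_eq_getElem?_getD] at h1'
        rw [if_neg h1, ih (j + 1) acc (by omega) (by omega)]
        by_cases h10 : j ≤ 10
        · rw [pvSegStep row j 11 hlt (by omega)]
          simp [Ne.symm h1']
        · have hd1 : 11 - j = 0 := by omega
          have hd2 : 11 - (j + 1) = 0 := by omega
          simp [hd1, hd2]
    · rw [dif_neg hlt]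
      have hd : row.drop j = [] := List.drop_eq_nil_of_le (by omega)
      simp [hd]

-- segment 2 (indices 4..7), continuing into segment 3
theorem pvSeg2 (row : List Int) : ∀ (fuel j : Nat) (acc : List String), 4 ≤ j → j ≤ 8 → 8 ≤ j + fuel →
    pvRowLoopA row j acc = acc ++ (if 1 ∈ (row.drop j).take (8 - j) then ["veggies"] else [])
      ++ (if 1 ∈ (row.drop 8).take 3 then ["milk product"] else []) := by
  intro fuel
  induction fuel with
  | zero =>
    intro j acc h4 h8 hf
    have hj : j = 8 := by omega
    subst hj
    rw [pvSeg3 row (row.length + 8) 8 acc (by omega) (by omega)]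
    simp
  | succ n ih =>
    intro j acc h4 h8 hf
    by_cases hj8 : j = 8
    · subst hj8
      rw [pvSeg3 row (row.length + 8) 8 acc (by omega) (by omega)]
      simp
    · have hjlt : j < 8 := by omega
      rw [pvRowLoopA]
      by_cases hlt : j < row.length
      · rw [dif_pos hlt]
        by_cases h1 : row.getD j 0 = 1
        · have h1' := h1; rw [List.getD_eq_getElem?_getD] at h1'
          rw [if_pos h1, if_neg (by omega : ¬ j ≤ 3), if_pos (by omega : j ≤ 7)]
          rw [pvSeg3 row (row.length + 8) 8 (acc ++ ["veggies"]) (by omega) (by omega)]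
          rw [pvSegStep row j 8 hlt (by omega)]
          simp [h1']
        · have h1' := h1; rw [List.getD_eq_getElem?_getD] at h1'
          rw [if_neg h1, ih (j + 1) acc (by omega) (by omega) (by omega)]
          rw [pvSegStep row j 8 hlt (by omega)]
          simp [Ne.symm h1']
      · rw [dif_neg hlt]
        have hd : row.drop j = [] := List.drop_eq_nil_of_le (by omega)
        have hd8 : row.drop 8 = [] := List.drop_eq_nil_of_le (by omega)
        simp [hd, hd8]

-- segment 1 (indices 0..3), continuing into segments 2 and 3
theorem pvSeg1 (row : List Int) : ∀ (fuel j : Nat) (acc : List String), j ≤ 4 → 4 ≤ j + fuel →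
    pvRowLoopA row j acc = acc ++ (if 1 ∈ (row.drop j).take (4 - j) then ["non-veg"] else [])
      ++ (if 1 ∈ (row.drop 4).take 4 then ["veggies"] else [])
      ++ (if 1 ∈ (row.drop 8).take 3 then ["milk product"] else []) := by
  intro fuel
  induction fuel with
  | zero =>
    intro j acc h4 hf
    have hj : j = 4 := by omega
    subst hj
    rw [pvSeg2 row (row.length + 8) 4 acc (by omega) (by omega) (by omega)]
    simp
  | succ n ih =>
    intro j acc h4 hf
    by_cases hj4 : j = 4
    · subst hj4
      rw [pvSeg2 row (row.length + 8) 4 acc (by omega) (by omega) (by omega)]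
      simp
    · have hjlt : j < 4 := by omega
      rw [pvRowLoopA]
      by_cases hlt : j < row.length
      · rw [dif_pos hlt]
        by_cases h1 : row.getD j 0 = 1
        · have h1' := h1; rw [List.getD_eq_getElem?_getD] at h1'
          rw [if_pos h1, if_pos (by omega : j ≤ 3)]
          rw [pvSeg2 row (row.length + 8) 4 (acc ++ ["non-veg"]) (by omega) (by omega) (by omega)]
          rw [pvSegStep row j 4 hlt (by omega)]
          simp [h1']
        · have h1' := h1; rw [List.getD_eq_getElem?_getD] at h1'
          rw [if_neg h1, ih (j + 1) acc (by omega) (by omega)]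
          rw [pvSegStep row j 4 hlt (by omega)]
          simp [Ne.symm h1']
      · rw [dif_neg hlt]
        have hd : row.drop j = [] := List.drop_eq_nil_of_le (by omega)
        have hd4 : row.drop 4 = [] := List.drop_eq_nil_of_le (by omega)
        have hd8 : row.drop 8 = [] := List.drop_eq_nil_of_le (by omega)
        simp [hd, hd4, hd8]

-- zip against an appended table splits at the table's seam
theorem pvZipSplit {α β : Type} (a b : List β) : ∀ (l : List α),
    l.zip (a ++ b) = (l.take a.length).zip a ++ (l.drop a.length).zip b := by
  induction a with
  | nil => intro l; simp
  | cons x a' ih =>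
    intro l
    cases l with
    | nil => simp
    | cons y l' => simp [ih l']

-- folding pvRowStep over a constant-label segment appends the label at its first hit
theorem pvSegFold (lab : String) : ∀ (n : Nat) (l : List Int) (acc : List String),
    ((l.zip (List.replicate n lab)).foldl pvRowStep acc) =
      if 1 ∈ l.take n ∧ lab ∉ acc then acc ++ [lab] else acc := by
  intro n
  induction n with
  | zero => intro l acc; simp
  | succ m ih =>
    intro l acc
    cases l with
    | nil => simp
    | cons v l' =>
      rw [List.replicate_succ, List.zip_cons_cons, List.foldl_cons]
      by_cases h1 : v = 1
      · by_cases hm : lab ∈ acc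
        · rw [show pvRowStep acc (v, lab) = acc by simp [pvRowStep, hm]]
          rw [ih l' acc]
          simp [hm]
        · rw [show pvRowStep acc (v, lab) = acc ++ [lab] by simp [pvRowStep, h1, hm]]
          rw [ih l' (acc ++ [lab])]
          simp [h1, hm]
      · rw [show pvRowStep acc (v, lab) = acc by simp [pvRowStep, h1]]
        rw [ih l' acc]
        simp [Ne.symm h1]

-- each row: A's filled-then-defaulted z[i] equals B's table-driven pass
theorem pvRowEq (row : List Int) :
    (let zi := pvRowLoopA row 0 []
     if zi.length = 0 then ["extras"] else zi) = pvRowLabelsB row := by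
  have hA := pvSeg1 row (row.length + 8) 0 [] (by omega) (by omega)
  simp only [Nat.sub_zero, List.drop_zero, List.nil_append] at hA
  unfold pvRowLabelsB pvTable
  rw [pvZipSplit]
  simp only [List.length_append, List.length_replicate]
  rw [pvZipSplit, List.length_replicate, List.foldl_append, List.foldl_append]
  rw [pvSegFold, pvSegFold, pvSegFold]
  simp only [List.take_take, List.drop_take, Nat.min_self] at *
  norm_num
  by_cases h1 : 1 ∈ row.take 4 <;> by_cases h2 : 1 ∈ (row.drop 4).take 4 <;>
    by_cases h3 : 1 ∈ (row.drop 8).take 3 <;>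
    simp [hA, h1, h2, h3]

theorem finalcatogery_spec_aux : ∀ (featurevector : List (List Int)),
    finalcatogery featurevector = finalcatogery_alt featurevector := by
  intro fv
  unfold finalcatogery finalcatogery_alt
  exact List.map_congr_left (fun row _ => pvRowEq row)

-- ===== VERDICT (by name: the statement is the Claim_ definition above) =====
theorem finalcatogery_spec : Claim_equal_finalcatogery := by
  intro fv _
  unfold Spec_finalcatogery
  exact finalcatogery_spec_aux fv
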